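-- pv_equiv track=rewrite | github.com/qubogame/qubogame.github.io | localization/translations.py | _mapTranslations
-- ===== SOURCE A (Python) =====
-- def _mapTranslations (raw) -> dict[str, dict[str, str]]:
--     '''Given the raw spreadsheet data, creates a dictionary which maps localization keys to language-specific location data
--
--     For instance, to get the translation of the key "test.key" for the spreadsheet language called "Spanish" one would use:
--
--         _mapTranslations(raw)["test.key"]["Spanish"]
--     '''
--
--     translations = {}
--
--     headers = raw[0] # List of languages
--
--     for i in range(1, len(raw)):
--         row = raw[i]
--
--         # If this row is empty or if there is no key assigned to it, ignore it
--         if not row or not row[0].strip(): continue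
--
--         languages = {}
--
--         for j in range (1, len(headers)):
--             # Go through translations one by one and parse them
--
--             language = headers[j].strip()
--             if not language: continue # No language for this index, skip
--
--             translation = row[j] if j < len(row) else ""
--             languages[language] = translation
--
--         translations[row[0].strip()] = languages
--
--     return translations
-- ===== SOURCE B (Python) =====
-- def _mapTranslations(raw) -> dict[str, dict[str, str]]:
--     headers = raw[0]
--
--     translations = {}
--     # First pass: register each key (in row order) with an empty language dict.
--     for row in raw[1:]:
--         if row and row[0].strip():
--             translations[row[0].strip()] = {}
--
--     # Second pass, column-major: for each language column fill every key's dict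
--     # in place.  Every valid (column, row) pair gets written exactly once, so the
--     # last row with a duplicate key wins per language, as in a row-major build.
--     for j in range(1, len(headers)):
--         language = headers[j].strip()
--         if not language:
--             continue
--         for row in raw[1:]:
--             if not row or not row[0].strip():
--                 continue
--             translations[row[0].strip()][language] = row[j] if j < len(row) else ""
--
--     return translations
-- ===== Notes on version B (the rewrite author's own statement) =====
-- stated objective: alternative
-- what changed: B replaces A's row-major build (a fresh inner dict per row, rescanning headers) with a two-stage column-major build: a first pass registers every key with an empty dict, then an outer loop over language columns fills all keys' dicts in place.
-- outside the precondition, e.g. on _mapTranslations([]): A raises IndexError, B raises IndexError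
import Mathlib
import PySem

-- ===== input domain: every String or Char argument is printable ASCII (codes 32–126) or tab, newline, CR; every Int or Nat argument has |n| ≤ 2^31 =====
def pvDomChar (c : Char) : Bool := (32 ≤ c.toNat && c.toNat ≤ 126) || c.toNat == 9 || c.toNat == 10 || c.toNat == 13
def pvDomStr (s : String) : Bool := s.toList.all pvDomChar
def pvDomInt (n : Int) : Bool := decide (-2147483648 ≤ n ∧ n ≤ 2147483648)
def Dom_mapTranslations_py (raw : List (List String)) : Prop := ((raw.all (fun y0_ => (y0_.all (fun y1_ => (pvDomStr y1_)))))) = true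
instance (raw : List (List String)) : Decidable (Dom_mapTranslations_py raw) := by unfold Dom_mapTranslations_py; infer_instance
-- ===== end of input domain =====

-- B builds the table column-major in two staged passes (register keys, then fill each language
-- column into every key's dict in place) instead of A's row-major build of a fresh inner dict per
-- row (objective: alternative).

-- ===== PORT A =====
def mapTranslations_py (raw : List (List String)) : List (String × List (String × String)) :=
  let headers := (PySem.List.pyGet? raw 0).getD []   -- raw[0]; none (IndexError, raw = []) is excluded by Pre_
  let translations :=
    (PySem.List.pyRange 1 (raw.length : Int)).foldl (fun translations i =>
      let row := PySem.List.pyGetD raw i []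
      if row = [] ∨ PySem.Str.strip (PySem.List.pyGetD row 0 "") = "" then translations
      else
        let languages :=
          (PySem.List.pyRange 1 (headers.length : Int)).foldl (fun languages j =>
            let language := PySem.Str.strip (PySem.List.pyGetD headers j "")
            if language = "" then languages
            else languages.insert language
                   (if j < (row.length : Int) then PySem.List.pyGetD row j "" else ""))
            (PySem.Dict.empty : PySem.Dict String String)
        translations.insert (PySem.Str.strip (PySem.List.pyGetD row 0 "")) languages.items)
      (PySem.Dict.empty : PySem.Dict String (List (String × String)))
  translations.items

-- ===== PORT B =====
def mapTranslations_py_alt (raw : List (List String)) : List (String × List (String × String)) :=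
  let headers := (PySem.List.pyGet? raw 0).getD []   -- raw[0]; none (IndexError, raw = []) is excluded by Pre_
  -- first pass: register every key with an empty dict ('row and row[0].strip()' is truthy iff ¬(row empty ∨ key empty))
  let t0 :=
    (PySem.List.slice raw (some 1) none).foldl (fun t row =>
      if row = [] ∨ PySem.Str.strip (PySem.List.pyGetD row 0 "") = "" then t
      else t.insert (PySem.Str.strip (PySem.List.pyGetD row 0 ""))
             (PySem.Dict.empty : PySem.Dict String String))
      (PySem.Dict.empty : PySem.Dict String (PySem.Dict String String))
  -- second pass, column-major: translations[key][language] = v; the key is always present (first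
  -- pass), so Python's d[k][lang] = v is exactly Dict.modify at k (the default is never used)
  let translations :=
    (PySem.List.pyRange 1 (headers.length : Int)).foldl (fun t j =>
      let language := PySem.Str.strip (PySem.List.pyGetD headers j "")
      if language = "" then t
      else
        (PySem.List.slice raw (some 1) none).foldl (fun t row =>
          if row = [] ∨ PySem.Str.strip (PySem.List.pyGetD row 0 "") = "" then t
          else t.modify (PySem.Str.strip (PySem.List.pyGetD row 0 "")) PySem.Dict.empty
                 (fun d => d.insert language
                    (if j < (row.length : Int) then PySem.List.pyGetD row j "" else ""))) t) t0
  translations.items.map (fun p => (p.1, p.2.items))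

-- ===== PRECONDITION & SPEC =====
-- Pre_ excludes only raw = [], where A raises IndexError on raw[0] (B raises there too).
def Pre_mapTranslations_py (raw : List (List String)) : Prop := raw ≠ []
instance (raw : List (List String)) : Decidable (Pre_mapTranslations_py raw) := by
  unfold Pre_mapTranslations_py; infer_instance
def pvWitness_mapTranslations_py : List (List String) := [["key", "en"], ["a", "x"]]

def Spec_mapTranslations_py (raw : List (List String)) (out : List (String × List (String × String))) : Prop := out = mapTranslations_py_alt raw
instance (raw : List (List String)) (out : List (String × List (String × String))) : Decidable (Spec_mapTranslations_py raw out) := by unfold Spec_mapTranslations_py; infer_instance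

-- ===== CLAIM (what is proved, stated in full; the proofs are below) =====
def Claim_equal_mapTranslations_py : Prop := ∀ (raw : List (List String)), Dom_mapTranslations_py raw → Pre_mapTranslations_py raw → Spec_mapTranslations_py raw (mapTranslations_py raw)

-- ===== LEMMAS AND PROOFS =====

-- A 'for' loop that SKIPS elements satisfying p is the fold over the filtered list.
theorem foldl_skip_eq_filter {α δ : Type} (p : α → Prop) [DecidablePred p] (f : δ → α → δ)
    (l : List α) (init : δ) :
    l.foldl (fun acc x => if p x then acc else f acc x) init
      = (l.filter (fun x => decide (¬ p x))).foldl f init := by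
  rw [← PySem.List.foldl_ite_eq_foldl_filter (fun x => ¬ p x) f l init]
  exact PySem.List.foldl_congr_mem _ _ _ _ (fun acc x _ => by by_cases h : p x <;> simp [h])

-- Lookup after a fold of key-driven inserts: the LAST element with the given key wins.
theorem getD_foldl_insert_last {ν ρ : Type} (rows : List ρ) (key : ρ → String) (F : ρ → ν)
    (t : PySem.Dict String ν) (k : String) (d0 : ν) :
    (rows.foldl (fun t r => t.insert (key r) (F r)) t).getD k d0
      = match (rows.filter (fun r => decide (key r = k))).getLast? with
        | some r => F r
        | none => t.getD k d0 := by
  induction rows using List.reverseRecOn with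
  | nil => simp
  | append_singleton rs r ih =>
    rw [List.foldl_append, List.filter_append]
    simp only [List.foldl_cons, List.foldl_nil, List.filter_cons, List.filter_nil]
    by_cases h : key r = k
    · simp [h]
    · have h' : ¬ (k = key r) := fun hk => h hk.symm
      simp [h, h', PySem.Dict.getD_insert, ih]

-- Lookup after one column pass of in-place modifies: the LAST row with the given key
-- determines the inserted value (earlier duplicates are overwritten at the same language).
theorem getD_foldl_modify_last {ρ : Type} (rows : List ρ) (key : ρ → String) (lang : String)
    (vv : ρ → String) (t : PySem.Dict String (PySem.Dict String String)) (k : String) :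
    (rows.foldl (fun t r => t.modify (key r) PySem.Dict.empty (fun d => d.insert lang (vv r))) t).getD k PySem.Dict.empty
      = match (rows.filter (fun r => decide (key r = k))).getLast? with
        | some r => (t.getD k PySem.Dict.empty).insert lang (vv r)
        | none => t.getD k PySem.Dict.empty := by
  induction rows using List.reverseRecOn with
  | nil => simp
  | append_singleton rs r ih =>
    rw [List.foldl_append, List.filter_append]
    simp only [List.foldl_cons, List.foldl_nil, List.filter_cons, List.filter_nil]
    by_cases h : key r = k
    · subst h
      have e1 : (if decide (key r = key r) = true then [r] else []) = [r] := by simp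
      rw [e1, List.getLast?_concat, PySem.Dict.getD_modify, if_pos rfl, ih]
      cases hl : (rs.filter (fun r' => decide (key r' = key r))).getLast? with
      | none => rfl
      | some r' => simp [PySem.Dict.insert_insert_self]
    · have h' : ¬ (k = key r) := fun hk => h hk.symm
      simp [h, h', PySem.Dict.getD_modify, ih]

-- Lookup after B's whole second phase: the entry at k evolves exactly as A's inner dict
-- built from the LAST row carrying key k.
theorem getD_phase2 {ρ : Type} (L : List Int) (rows : List ρ) (key : ρ → String)
    (lang : Int → String) (vv : ρ → Int → String) (k : String) (r : ρ)
    (h : (rows.filter (fun r => decide (key r = k))).getLast? = some r) :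
    ∀ (t : PySem.Dict String (PySem.Dict String String)),
    (L.foldl (fun t j => rows.foldl
        (fun t row => t.modify (key row) PySem.Dict.empty (fun d => d.insert (lang j) (vv row j))) t) t).getD k PySem.Dict.empty
      = L.foldl (fun d j => d.insert (lang j) (vv r j)) (t.getD k PySem.Dict.empty) := by
  induction L with
  | nil => intro t; rfl
  | cons j L ih =>
    intro t
    simp only [List.foldl_cons]
    rw [ih, getD_foldl_modify_last, h]

-- Set.update with elements already present changes nothing.
theorem set_update_of_subset (s : PySem.Set String) (xs : List String) (h : ∀ x ∈ xs, x ∈ s) :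
    PySem.Set.update s xs = s := by
  induction xs generalizing s with
  | nil => rfl
  | cons x xs ih =>
    have hx : PySem.Set.add s x = s := by simp [PySem.Set.add, h x (List.mem_cons_self)]
    show PySem.Set.update (PySem.Set.add s x) xs = s
    rw [hx]
    exact ih s (fun y hy => h y (List.mem_cons_of_mem _ hy))

-- B's second phase never changes the key list (every modified key is already present).
theorem keys_phase2 {ρ : Type} (L : List Int) (rows : List ρ) (key : ρ → String)
    (lang : Int → String) (vv : ρ → Int → String) :
    ∀ (t : PySem.Dict String (PySem.Dict String String)), (∀ r ∈ rows, key r ∈ t.keys) →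
    (L.foldl (fun t j => rows.foldl
        (fun t row => t.modify (key row) PySem.Dict.empty (fun d => d.insert (lang j) (vv row j))) t) t).keys = t.keys := by
  induction L with
  | nil => intro t _; rfl
  | cons j L ih =>
    intro t ht
    simp only [List.foldl_cons]
    have hk : (rows.foldl (fun t row => t.modify (key row) PySem.Dict.empty
        (fun d => d.insert (lang j) (vv row j))) t).keys = t.keys := by
      rw [PySem.Dict.keys_foldl_modify_key rows key PySem.Dict.empty
            (fun _ row => (fun d => d.insert (lang j) (vv row j)))]
      exact set_update_of_subset _ _ (by
        intro x hx
        obtain ⟨r, hr, rfl⟩ := List.mem_map.mp hx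
        exact ht r hr)
    rw [ih _ (by intro r hr; rw [hk]; exact ht r hr), hk]


-- The heart of the equivalence: a row-major build (fresh inner dict per row, A) and a
-- column-major two-stage build (B) produce the same items list.
theorem main_core (rows : List (List String)) (L : List Int)
    (key : List String → String) (lang : Int → String) (vv : List String → Int → String) :
    (rows.foldl (fun t row => t.insert (key row)
        ((L.foldl (fun d j => d.insert (lang j) (vv row j))
          (PySem.Dict.empty : PySem.Dict String String)).items))
      (PySem.Dict.empty : PySem.Dict String (List (String × String)))).items
    = List.map (fun p => (p.1, p.2.items))
      ((L.foldl (fun t j => rows.foldl (fun t row => t.modify (key row) PySem.Dict.empty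
            (fun d => d.insert (lang j) (vv row j))) t)
        (rows.foldl (fun t row => t.insert (key row)
            (PySem.Dict.empty : PySem.Dict String String))
          (PySem.Dict.empty : PySem.Dict String (PySem.Dict String String)))).items) := by
  set t0 := rows.foldl (fun t row => t.insert (key row)
      (PySem.Dict.empty : PySem.Dict String String))
    (PySem.Dict.empty : PySem.Dict String (PySem.Dict String String)) with ht0
  set dictA := rows.foldl (fun t row => t.insert (key row)
      ((L.foldl (fun d j => d.insert (lang j) (vv row j))
        (PySem.Dict.empty : PySem.Dict String String)).items))
    (PySem.Dict.empty : PySem.Dict String (List (String × String))) with hA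
  set dictB := L.foldl (fun t j => rows.foldl (fun t row => t.modify (key row) PySem.Dict.empty
      (fun d => d.insert (lang j) (vv row j))) t) t0 with hB
  have kt0 : t0.keys = PySem.Set.ofList (rows.map key) := by
    rw [ht0, PySem.Dict.keys_foldl_insert_key rows key (fun _ _ => PySem.Dict.empty),
        PySem.Dict.keys_empty]
    rfl
  have nodt0 : t0.keys.Nodup := by
    rw [ht0]
    exact PySem.Dict.nodup_keys_foldl_insert_key rows key _ _ PySem.Dict.nodup_keys_empty
  have hmem : ∀ r ∈ rows, key r ∈ t0.keys := by
    intro r hr; rw [kt0, PySem.Set.mem_ofList]; exact List.mem_map_of_mem hr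
  have kB : dictB.keys = t0.keys := by rw [hB]; exact keys_phase2 L rows key lang vv t0 hmem
  have nodB : dictB.keys.Nodup := kB ▸ nodt0
  have kA : dictA.keys = PySem.Set.ofList (rows.map key) := by
    rw [hA, PySem.Dict.keys_foldl_insert_key rows key _, PySem.Dict.keys_empty]
    rfl
  have nodA : dictA.keys.Nodup := by
    rw [hA]
    exact PySem.Dict.nodup_keys_foldl_insert_key rows key _ _ PySem.Dict.nodup_keys_empty
  rw [PySem.Dict.items_eq_map_keys dictA nodA [],
      PySem.Dict.items_eq_map_keys dictB nodB PySem.Dict.empty, List.map_map, kA, kB, kt0]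
  apply List.map_congr_left
  intro k hk
  obtain ⟨r0, hr0, hkr0⟩ := List.mem_map.mp ((PySem.Set.mem_ofList _ _).mp hk)
  have hfil : r0 ∈ rows.filter (fun r => decide (key r = k)) :=
    List.mem_filter.mpr ⟨hr0, by simp [hkr0]⟩
  obtain ⟨r, hr⟩ : ∃ r, (rows.filter (fun r => decide (key r = k))).getLast? = some r := by
    cases e : (rows.filter (fun r => decide (key r = k))).getLast? with
    | none => exact absurd (List.getLast?_eq_none_iff.mp e ▸ hfil) (List.not_mem_nil)
    | some r => exact ⟨r, rfl⟩
  have hAv : dictA.getD k [] = (L.foldl (fun d j => d.insert (lang j) (vv r j))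
      (PySem.Dict.empty : PySem.Dict String String)).items := by
    rw [hA, getD_foldl_insert_last, hr]
  have ht0v : t0.getD k PySem.Dict.empty = PySem.Dict.empty := by
    rw [ht0, getD_foldl_insert_last, hr]
  have hBv : dictB.getD k PySem.Dict.empty
      = L.foldl (fun d j => d.insert (lang j) (vv r j))
          (PySem.Dict.empty : PySem.Dict String String) := by
    rw [hB, getD_phase2 L rows key lang vv k r hr t0, ht0v]
  simp only [Function.comp_def]
  rw [hAv, hBv]

-- ===== VERDICT (by name: the statement is the Claim_ definition above) =====
set_option maxHeartbeats 1000000 in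
theorem mapTranslations_py_spec : Claim_equal_mapTranslations_py := by
  intro raw _ _
  unfold Spec_mapTranslations_py mapTranslations_py mapTranslations_py_alt
  simp only [PySem.List.slice_from_one]
  -- A's outer index loop is a fold over raw.tail
  rw [show ((raw.length : Int)) = PySem.List.len raw from rfl,
      PySem.List.foldl_pyRange_pyGetD raw ([] : List String)
        (fun translations row =>
          if row = [] ∨ PySem.Str.strip (PySem.List.pyGetD row 0 "") = "" then translations
          else
            translations.insert (PySem.Str.strip (PySem.List.pyGetD row 0 ""))
              ((PySem.List.pyRange 1 (((PySem.List.pyGet? raw 0).getD []).length : Int)).foldl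
                (fun languages j =>
                  if PySem.Str.strip (PySem.List.pyGetD ((PySem.List.pyGet? raw 0).getD []) j "") = ""
                  then languages
                  else languages.insert
                        (PySem.Str.strip (PySem.List.pyGetD ((PySem.List.pyGet? raw 0).getD []) j ""))
                        (if j < (row.length : Int) then PySem.List.pyGetD row j "" else ""))
                (PySem.Dict.empty : PySem.Dict String String)).items)
        (PySem.Dict.empty : PySem.Dict String (List (String × String))) (by norm_num)]
  rw [show (1 : Int).toNat = 1 from rfl, List.drop_one]
  rw [foldl_skip_eq_filter (fun (row : List String) => row = [] ∨ PySem.Str.strip (PySem.List.pyGetD row 0 "") = "")]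
  rw [foldl_skip_eq_filter (fun (row : List String) => row = [] ∨ PySem.Str.strip (PySem.List.pyGetD row 0 "") = "")]
  rw [foldl_skip_eq_filter (fun j => PySem.Str.strip (PySem.List.pyGetD ((PySem.List.pyGet? raw 0).getD []) j "") = "")]
  rw [PySem.List.foldl_congr_mem _ _
        (fun (translations : PySem.Dict String (List (String × String))) (row : List String) =>
          translations.insert (PySem.Str.strip (PySem.List.pyGetD row 0 ""))
            ((((PySem.List.pyRange 1 ((((PySem.List.pyGet? raw 0).getD []).length : Int))).filter
                (fun j => decide ¬(PySem.Str.strip (PySem.List.pyGetD ((PySem.List.pyGet? raw 0).getD []) j "") = ""))).foldl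
              (fun languages j =>
                languages.insert (PySem.Str.strip (PySem.List.pyGetD ((PySem.List.pyGet? raw 0).getD []) j ""))
                  (if j < (row.length : Int) then PySem.List.pyGetD row j "" else ""))
              (PySem.Dict.empty : PySem.Dict String String)).items)) _
        (fun acc row _ => by
          rw [foldl_skip_eq_filter
                (fun j => PySem.Str.strip (PySem.List.pyGetD ((PySem.List.pyGet? raw 0).getD []) j "") = "")])]
  rw [PySem.List.foldl_congr_mem _ _
        (fun (t : PySem.Dict String (PySem.Dict String String)) (j : Int) =>
          ((raw.tail.filter
              (fun row => decide ¬(row = [] ∨ PySem.Str.strip (PySem.List.pyGetD row 0 "") = ""))).foldl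
            (fun t row =>
              t.modify (PySem.Str.strip (PySem.List.pyGetD row 0 "")) PySem.Dict.empty
                (fun d => d.insert (PySem.Str.strip (PySem.List.pyGetD ((PySem.List.pyGet? raw 0).getD []) j ""))
                  (if j < (row.length : Int) then PySem.List.pyGetD row j "" else ""))) t)) _
        (fun acc j _ => by
          rw [foldl_skip_eq_filter
                (fun (row : List String) => row = [] ∨ PySem.Str.strip (PySem.List.pyGetD row 0 "") = "")])]
  exact main_core _ _ _ _ _
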